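-- pv_equiv track=rewrite | github.com/BohdanZanoz/qgis-midvatten-plugin | tools/import_fieldlogger.py | sublocation_to_groups
-- ===== SOURCE A (Python) =====
-- from builtins import range
--
-- def sublocation_to_groups(sublocations, delimiter='.'):
--     """
--     This method splits sublocation using a splitter, default to u'.'. Each list position is grouped to lists
--      containing all distinct values. It's finally stored in a dict with the lenght of the splitted group as key.
--     :param: sublocations: A list of sublocations, ex: ['c', 'a.1', 'a.2', 'b.1.1']
--     :return: a dict like {1: [set(distinct values)], 2: [set(distinct values)}, set(), set()], ...)
--     """
--     sublocation_groups = {}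
--     for sublocation in sublocations:
--         splitted = sublocation.split(delimiter)
--         length = len(splitted)
--         for index in range(length):
--             #a dict like {1: [set()], 2: [set(), set()], ...}
--             sublocation_groups.setdefault(length, [set()for i in range(length)])[index].add(splitted[index])
--     return sublocation_groups
-- ===== SOURCE B (Python) =====
-- def sublocation_to_groups(sublocations, delimiter='.'):
--     # Pass 1: bucket the split rows by their length.
--     groups_by_len = {}
--     for sublocation in sublocations:
--         splitted = sublocation.split(delimiter)
--         groups_by_len.setdefault(len(splitted), []).append(splitted)
--     # Pass 2: transpose each bucket; each column's distinct values form one set.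
--     return {length: [set(column) for column in zip(*rows)]
--             for length, rows in groups_by_len.items()}
-- ===== Notes on version B (the rewrite author's own statement) =====
-- stated objective: alternative
-- what changed: B buckets the split rows by length in one pass and then builds each group by transposing the bucket with zip(*rows) and taking set(column) per column, instead of A's on-the-fly setdefault of a list of empty sets mutated element-by-element for every index of every row; Pre_ only excludes a nonempty list with the empty delimiter, on which both programs raise ValueError from str.split.
import Mathlib
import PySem

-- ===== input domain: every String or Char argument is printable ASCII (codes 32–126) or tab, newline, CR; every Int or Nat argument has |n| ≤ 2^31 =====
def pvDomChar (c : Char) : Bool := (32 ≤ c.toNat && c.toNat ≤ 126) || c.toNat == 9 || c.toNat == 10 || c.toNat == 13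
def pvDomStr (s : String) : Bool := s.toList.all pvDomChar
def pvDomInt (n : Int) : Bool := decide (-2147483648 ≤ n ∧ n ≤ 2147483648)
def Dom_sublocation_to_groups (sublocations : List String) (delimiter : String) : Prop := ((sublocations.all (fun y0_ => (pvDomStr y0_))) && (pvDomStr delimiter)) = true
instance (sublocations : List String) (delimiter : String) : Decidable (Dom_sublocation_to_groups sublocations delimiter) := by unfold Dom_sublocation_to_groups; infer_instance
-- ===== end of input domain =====

-- B groups the split rows by length first and then transposes each bucket into per-index
-- distinct-value sets (alternative decomposition, same cost); equivalence is about return values.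

-- ===== PORT A =====
-- Literal port of A: for each sublocation, split, and for each index 0..length-1,
-- setdefault the list of `length` empty sets at key `length`, then add splitted[index]
-- to the set at `index` (the in-place element mutation is a modify of the value at the key).
def sublocation_to_groups (sublocations : List String) (delimiter : String) : List (Int × List (List String)) :=
  (sublocations.foldl (fun d sub =>
    let splitted := (PySem.Str.split? sub delimiter).getD []
    let length : Int := splitted.length
    (PySem.List.pyRange 0 length 1).foldl (fun d index =>
      let d := PySem.Dict.setdefault d length (List.replicate splitted.length ([] : List String))
      PySem.Dict.modify d length [] (fun sets =>
        sets.set index.toNat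
          (PySem.Set.add (sets.getD index.toNat []) (splitted.getD index.toNat "")))) d)
    PySem.Dict.empty).items

-- ===== PORT B =====
-- zip(*rows): in Source B every row of a bucket has the same length, so zip(*rows) is exactly
-- the list of columns indexed by the first row's length (exact on that domain).
def pvZipStar (rows : List (List String)) : List (List String) :=
  match rows with
  | [] => []
  | r0 :: _ => (List.range r0.length).map (fun i => rows.map (fun r => r.getD i ""))

def sublocation_to_groups_alt (sublocations : List String) (delimiter : String) : List (Int × List (List String)) :=
  let groups := sublocations.foldl (fun g sub =>
    let splitted := (PySem.Str.split? sub delimiter).getD []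
    PySem.Dict.modify g (splitted.length : Int) [] (fun rows => rows ++ [splitted]))
    PySem.Dict.empty
  groups.items.map (fun p => (p.1, (pvZipStar p.2).map (fun column => PySem.Set.ofList column)))

-- ===== PRECONDITION & SPEC =====
-- Pre_ excludes only the empty delimiter (when split is actually reached, i.e. the list is
-- nonempty), on which Python's str.split raises ValueError in both programs.
def Pre_sublocation_to_groups (sublocations : List String) (delimiter : String) : Prop := sublocations = [] ∨ delimiter ≠ ""
instance (sublocations : List String) (delimiter : String) : Decidable (Pre_sublocation_to_groups sublocations delimiter) := by unfold Pre_sublocation_to_groups; infer_instance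
def pvWitness_sublocation_to_groups : List String × String := (["c", "a.1", "a.2", "b.1.1"], ".")

def Spec_sublocation_to_groups (sublocations : List String) (delimiter : String) (out : List (Int × List (List String))) : Prop := out = sublocation_to_groups_alt sublocations delimiter
instance (sublocations : List String) (delimiter : String) (out : List (Int × List (List String))) : Decidable (Spec_sublocation_to_groups sublocations delimiter out) := by unfold Spec_sublocation_to_groups; infer_instance

-- ===== CLAIM (what is proved, stated in full; the proofs are below) =====
def Claim_equal_sublocation_to_groups : Prop := ∀ (sublocations : List String) (delimiter : String), Dom_sublocation_to_groups sublocations delimiter → Pre_sublocation_to_groups sublocations delimiter → Spec_sublocation_to_groups sublocations delimiter (sublocation_to_groups sublocations delimiter)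

-- ===== LEMMAS AND PROOFS =====

-- split never yields an empty list (Python s.split(sep) has at least one piece)
theorem pv_go_ne_nil (sep : List Char) : ∀ (fuel : Nat) (l cur : List Char) (acc : List (List Char)), PySem.Chars.splitOn.go sep fuel l cur acc ≠ [] := by
  intro fuel
  induction fuel with
  | zero => intro l cur acc; simp [PySem.Chars.splitOn.go]
  | succ n ih =>
    intro l cur acc
    cases l with
    | nil => simp [PySem.Chars.splitOn.go]
    | cons c rest =>
      rw [PySem.Chars.splitOn.go]
      split_ifs with h
      · exact ih _ _ _
      · exact ih _ _ _

theorem pv_split_ne_nil (s d : String) (hd : d ≠ "") : (PySem.Str.split? s d).getD [] ≠ [] := by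
  have hdl : d.toList ≠ [] := by simpa [String.toList_eq_nil_iff] using hd
  simp [PySem.Str.split?, PySem.Chars.split?, List.isEmpty_iff, hdl, PySem.Chars.splitOn]
  exact pv_go_ne_nil _ _ _ _ _

-- the value B's second pass assigns to a bucket
def pvV (rows : List (List String)) : List (List String) :=
  (pvZipStar rows).map (fun column => PySem.Set.ofList column)

-- A's per-row step (the inner loop of port A), and its Nat-indexed form
def pvStepA (d : PySem.Dict Int (List (List String))) (r : List String) : PySem.Dict Int (List (List String)) :=
  (PySem.List.pyRange 0 (r.length : Int) 1).foldl (fun d index =>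
    let d := PySem.Dict.setdefault d (r.length : Int) (List.replicate r.length ([] : List String))
    PySem.Dict.modify d (r.length : Int) [] (fun sets =>
      sets.set index.toNat
        (PySem.Set.add (sets.getD index.toNat []) (r.getD index.toNat "")))) d

def pvInner (d : PySem.Dict Int (List (List String))) (r : List String) (k : Nat) : PySem.Dict Int (List (List String)) :=
  (List.range k).foldl (fun d i =>
    let d := PySem.Dict.setdefault d (r.length : Int) (List.replicate r.length ([] : List String))
    PySem.Dict.modify d (r.length : Int) [] (fun sets =>
      sets.set i (PySem.Set.add (sets.getD i []) (r.getD i "")))) d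

theorem pvStepA_eq_inner (d : PySem.Dict Int (List (List String))) (r : List String) :
    pvStepA d r = pvInner d r r.length := by
  unfold pvStepA pvInner
  rw [show ((PySem.List.pyRange 0 (r.length : Int) 1)) = PySem.List.pyRange 0 (r.length : Int) from rfl,
      PySem.List.pyRange_zero_natCast, List.foldl_map]
  simp

theorem pv_sublocation_to_groups_eq (subs : List String) (delim : String) :
    sublocation_to_groups subs delim =
      (subs.foldl (fun d sub => pvStepA d ((PySem.Str.split? sub delim).getD [])) PySem.Dict.empty).items := rfl

theorem pv_set_step {α β : Type} (f : α → β → α) (dflt : α) (dfltb : β) (v : List α) (r : List β) (k : Nat) (hk : k < v.length) (hkr : k < r.length) :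
    (List.zipWith f (v.take k) (r.take k) ++ v.drop k).set k
      (f ((List.zipWith f (v.take k) (r.take k) ++ v.drop k).getD k dflt) (r.getD k dfltb)) =
    List.zipWith f (v.take (k+1)) (r.take (k+1)) ++ v.drop (k+1) := by
  have hX : (List.zipWith f (v.take k) (r.take k)).length = k := by
    simp; omega
  have hlt : k < (List.zipWith f (v.take k) (r.take k) ++ v.drop k).length := by
    simp; omega
  have hget : (List.zipWith f (v.take k) (r.take k) ++ v.drop k).getD k dflt = v[k] := by
    rw [List.getD_eq_getElem _ _ hlt, List.getElem_append_right (by omega)]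
    simp [hX]
  have hrk : r.getD k dfltb = r[k] := List.getD_eq_getElem _ _ hkr
  rw [hget, hrk, List.set_append]
  rw [if_neg (by omega)]
  rw [List.drop_eq_getElem_cons hk, hX, Nat.sub_self]
  simp only [List.set_cons_zero]
  rw [List.take_add_one, List.take_add_one, List.getElem?_eq_getElem hk, List.getElem?_eq_getElem hkr]
  simp only [Option.toList_some]
  rw [List.zipWith_append (by simp; omega)]
  simp

theorem pv_getD_setdefault_of_ne {κ ν : Type} [BEq κ] [LawfulBEq κ] (d : PySem.Dict κ ν) {k k' : κ} (v d0 : ν) (h : k' ≠ k) :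
    (d.setdefault k v).getD k' d0 = d.getD k' d0 := by
  rw [PySem.Dict.getD_eq_get?_getD, PySem.Dict.get?_setdefault_of_ne d v h, ← PySem.Dict.getD_eq_get?_getD]

theorem pvInner_spec (d : PySem.Dict Int (List (List String))) (r : List String)
    (hv : (d.getD (r.length : Int) (List.replicate r.length ([] : List String))).length = r.length) :
    ∀ k, 1 ≤ k → k ≤ r.length →
      (∀ c, (pvInner d r k).getD c [] =
        if c = (r.length : Int) then
          List.zipWith PySem.Set.add ((d.getD (r.length : Int) (List.replicate r.length [])).take k) (r.take k)
            ++ (d.getD (r.length : Int) (List.replicate r.length [])).drop k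
        else d.getD c []) ∧
      (∀ c, (pvInner d r k).contains c = (c == (r.length : Int) || d.contains c)) ∧
      ((pvInner d r k).keys = if d.contains (r.length : Int) then d.keys else d.keys ++ [(r.length : Int)]) := by
  intro k
  induction k with
  | zero => omega
  | succ k ih =>
    intro _ hk1
    by_cases hk0 : k = 0
    · subst hk0
      have h1 : pvInner d r 1 =
          PySem.Dict.modify (PySem.Dict.setdefault d (r.length : Int) (List.replicate r.length [])) (r.length : Int) []
            (fun sets => sets.set 0 (PySem.Set.add (sets.getD 0 []) (r.getD 0 ""))) := by
        simp [pvInner, List.range_succ]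
      refine ⟨?_, ?_, ?_⟩
      · intro c
        rw [h1, PySem.Dict.getD_modify]
        by_cases hc : c = (r.length : Int)
        · rw [if_pos hc, if_pos hc, PySem.Dict.getD_setdefault_self]
          have := pv_set_step PySem.Set.add [] "" (d.getD (r.length : Int) (List.replicate r.length [])) r 0 (by omega) (by omega)
          simpa using this
        · rw [if_neg hc, if_neg hc, pv_getD_setdefault_of_ne _ _ _ hc]
      · intro c
        rw [h1, PySem.Dict.contains_modify, PySem.Dict.contains_setdefault]
        cases h : (c == (r.length : Int)) <;> simp [h]
      · rw [h1, PySem.Dict.keys_modify]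
        by_cases hc : d.contains (r.length : Int) = true
        · rw [PySem.Dict.setdefault_of_contains _ _ hc, PySem.Dict.keys_insert_of_contains _ _ hc, if_pos hc]
        · have hc' : d.contains ((r.length : Int)) = false := by simpa using hc
          rw [PySem.Dict.setdefault_of_not_contains _ _ hc', PySem.Dict.insert_insert_self,
              PySem.Dict.keys_insert_of_not_contains _ _ hc', if_neg (by simp [hc'])]
    · have hk : 1 ≤ k := by omega
      obtain ⟨ihg, ihc, ihk⟩ := ih hk (by omega)
      have hcont : (pvInner d r k).contains (r.length : Int) = true := by simp [ihc]
      have h1 : pvInner d r (k+1) =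
          PySem.Dict.modify (PySem.Dict.setdefault (pvInner d r k) (r.length : Int) (List.replicate r.length [])) (r.length : Int) []
            (fun sets => sets.set k (PySem.Set.add (sets.getD k []) (r.getD k ""))) := by
        rw [pvInner, List.range_succ, List.foldl_append]
        rfl
      rw [PySem.Dict.setdefault_of_contains _ _ hcont] at h1
      refine ⟨?_, ?_, ?_⟩
      · intro c
        rw [h1, PySem.Dict.getD_modify]
        by_cases hc : c = (r.length : Int)
        · rw [if_pos hc, if_pos hc, ihg, if_pos rfl]
          exact pv_set_step PySem.Set.add [] "" _ r k (by omega) (by omega)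
        · rw [if_neg hc, if_neg hc, ihg, if_neg hc]
      · intro c
        rw [h1, PySem.Dict.contains_modify, ihc]
        cases h : (c == (r.length : Int)) <;> simp [h]
      · rw [h1, PySem.Dict.keys_modify, PySem.Dict.keys_insert_of_contains _ _ hcont, ihk]

theorem pvStepA_getD (d : PySem.Dict Int (List (List String))) (r : List String) (hr : r ≠ [])
    (hv : (d.getD (r.length : Int) (List.replicate r.length ([] : List String))).length = r.length) (c : Int) :
    (pvStepA d r).getD c [] =
      if c = (r.length : Int) then
        List.zipWith PySem.Set.add (d.getD (r.length : Int) (List.replicate r.length [])) r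
      else d.getD c [] := by
  have h1 : 1 ≤ r.length := by cases r; simp at hr; simp
  rw [pvStepA_eq_inner]
  rw [(pvInner_spec d r hv r.length h1 le_rfl).1 c]
  by_cases hc : c = (r.length : Int)
  · rw [if_pos hc, if_pos hc, List.take_of_length_le (le_of_eq hv), List.take_length,
        List.drop_of_length_le (le_of_eq hv), List.append_nil]
  · rw [if_neg hc, if_neg hc]

theorem pvStepA_contains (d : PySem.Dict Int (List (List String))) (r : List String) (hr : r ≠ []) (c : Int)
    (hv : (d.getD (r.length : Int) (List.replicate r.length ([] : List String))).length = r.length) :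
    (pvStepA d r).contains c = (c == (r.length : Int) || d.contains c) := by
  have h1 : 1 ≤ r.length := by cases r; simp at hr; simp
  rw [pvStepA_eq_inner]
  exact (pvInner_spec d r hv r.length h1 le_rfl).2.1 c

theorem pvStepA_keys (d : PySem.Dict Int (List (List String))) (r : List String) (hr : r ≠ [])
    (hv : (d.getD (r.length : Int) (List.replicate r.length ([] : List String))).length = r.length) :
    (pvStepA d r).keys = if d.contains (r.length : Int) then d.keys else d.keys ++ [(r.length : Int)] := by
  have h1 : 1 ≤ r.length := by cases r; simp at hr; simp
  rw [pvStepA_eq_inner]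
  exact (pvInner_spec d r hv r.length h1 le_rfl).2.2

-- first pvV column facts
theorem pvV_length (rows : List (List String)) (r0 : List String) (rest : List (List String)) (h : rows = r0 :: rest) :
    (pvV rows).length = r0.length := by
  subst h; simp [pvV, pvZipStar]

theorem pv_add_replicate (r : List String) :
    List.zipWith PySem.Set.add (List.replicate r.length ([] : PySem.Set String)) r = pvV [r] := by
  apply List.ext_getElem
  · simp [pvV, pvZipStar]
  · intro i h1 h2
    have hi : i < r.length := by simpa [pvV, pvZipStar] using h2
    simp [pvV, pvZipStar, PySem.Set.add, PySem.Set.ofList,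
      List.getD_eq_getElem _ _ hi, List.getElem?_eq_getElem hi]

theorem pv_add_snoc (rows : List (List String)) (r : List String) (hrows : rows ≠ [])
    (hlen : ∀ row ∈ rows, row.length = r.length) :
    List.zipWith PySem.Set.add (pvV rows) r = pvV (rows ++ [r]) := by
  obtain ⟨r0, rest, rfl⟩ : ∃ r0 rest, rows = r0 :: rest := by
    cases rows with
    | nil => simp at hrows
    | cons a b => exact ⟨a, b, rfl⟩
  have h0 : r0.length = r.length := hlen r0 (by simp)
  apply List.ext_getElem
  · simp [pvV, pvZipStar, h0]
  · intro i h1 h2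
    have hi : i < r.length := by simpa [pvV, pvZipStar, h0] using h2
    simp only [pvV, pvZipStar, List.getElem_zipWith, List.getElem_map, List.cons_append,
      List.getElem_map, List.getElem_range]
    have hcol : (r0 :: (rest ++ [r])).map (fun row => row.getD i "") =
        ((r0 :: rest).map (fun row => row.getD i "")) ++ [r.getD i ""] := by
      simp
    rw [hcol, PySem.Set.ofList_append,
        show ([r.getD i ""]) = (r.getD i "") :: [] from rfl, PySem.Set.update_cons, PySem.Set.update_nil,
        List.getD_eq_getElem _ _ hi]

-- B's per-row bucketing step (the loop body of port B's first pass)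
def pvStepB (g : PySem.Dict Int (List (List String))) (r : List String) : PySem.Dict Int (List (List String)) :=
  PySem.Dict.modify g (r.length : Int) [] (fun rows => rows ++ [r])

theorem pv_alt_eq (subs : List String) (delim : String) :
    sublocation_to_groups_alt subs delim =
      ((subs.foldl (fun g sub => pvStepB g ((PySem.Str.split? sub delim).getD [])) PySem.Dict.empty).items).map
        (fun p => (p.1, pvV p.2)) := rfl

-- the invariant tying A's dict of per-index sets to B's dict of bucketed rows
def pvInv (dA dB : PySem.Dict Int (List (List String))) : Prop :=
  dA.keys = dB.keys ∧ dB.keys.Nodup ∧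
  (∀ c, dA.contains c = dB.contains c) ∧
  (∀ c, dB.contains c = true → dB.getD c [] ≠ []) ∧
  (∀ c row, row ∈ dB.getD c [] → (row.length : Int) = c) ∧
  (∀ c, dA.getD c [] = pvV (dB.getD c []))

theorem pvInv_step (dA dB : PySem.Dict Int (List (List String))) (r : List String) (hr : r ≠ [])
    (h : pvInv dA dB) : pvInv (pvStepA dA r) (pvStepB dB r) := by
  obtain ⟨hkeys, hnodup, hcont, hne, hlen, hval⟩ := h
  have hv : (dA.getD (r.length : Int) (List.replicate r.length ([] : List String))).length = r.length := by
    cases hc : dA.contains (r.length : Int) with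
    | false =>
      rw [PySem.Dict.getD_of_not_contains _ _ hc, List.length_replicate]
    | true =>
      obtain ⟨v0, hv0⟩ : ∃ v0, dA.get? (r.length : Int) = some v0 := by
        have := PySem.Dict.contains_eq_isSome_get? (d := dA) (k := (r.length : Int))
        rw [hc] at this
        exact Option.isSome_iff_exists.mp this.symm
      rw [PySem.Dict.getD_of_get?_eq_some _ _ hv0, ← PySem.Dict.getD_of_get?_eq_some _ ([] : List (List String)) hv0]
      have hcB : dB.contains (r.length : Int) = true := by rw [← hcont]; exact hc
      obtain ⟨r0, rest, hrows⟩ : ∃ r0 rest, dB.getD (r.length : Int) [] = r0 :: rest := by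
        cases hrows : dB.getD (r.length : Int) [] with
        | nil => exact absurd hrows (hne _ hcB)
        | cons a b => exact ⟨a, b, rfl⟩
      rw [hval, pvV_length _ _ _ hrows]
      have := hlen _ r0 (by rw [hrows]; simp)
      exact_mod_cast this
  refine ⟨?_, ?_, ?_, ?_, ?_, ?_⟩
  · rw [pvStepA_keys _ _ hr hv, pvStepB, PySem.Dict.keys_modify]
    cases hc : dB.contains (r.length : Int) with
    | true =>
      rw [PySem.Dict.keys_insert_of_contains _ _ hc, if_pos (by rw [hcont]; exact hc), hkeys]
    | false =>
      rw [PySem.Dict.keys_insert_of_not_contains _ _ hc, if_neg (by rw [hcont, hc]; simp), hkeys]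
  · rw [pvStepB, PySem.Dict.keys_modify]
    cases hc : dB.contains (r.length : Int) with
    | true => rw [PySem.Dict.keys_insert_of_contains _ _ hc]; exact hnodup
    | false =>
      rw [PySem.Dict.keys_insert_of_not_contains _ _ hc]
      have : (r.length : Int) ∉ dB.keys := by
        intro hm
        rw [(PySem.Dict.contains_iff_mem_keys dB _).mpr hm] at hc
        simp at hc
      simp [List.nodup_append, hnodup]
      intro a ha hae
      exact this (hae ▸ ha)
  · intro c
    rw [pvStepA_contains _ _ hr c hv, pvStepB, PySem.Dict.contains_modify, hcont c]
  · intro c hcc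
    rw [pvStepB, PySem.Dict.getD_modify]
    by_cases hc : c = (r.length : Int)
    · rw [if_pos hc]; simp
    · rw [if_neg hc]
      apply hne
      rw [pvStepB, PySem.Dict.contains_modify] at hcc
      simpa [hc] using hcc
  · intro c row hm
    rw [pvStepB, PySem.Dict.getD_modify] at hm
    by_cases hc : c = (r.length : Int)
    · rw [if_pos hc] at hm
      rcases List.mem_append.mp hm with hm1 | hm2
      · rw [hc]; exact hlen _ _ hm1
      · rw [List.mem_singleton.mp hm2, hc]
    · rw [if_neg hc] at hm
      exact hlen _ _ hm
  · intro c
    rw [pvStepA_getD _ _ hr hv c, pvStepB, PySem.Dict.getD_modify]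
    by_cases hc : c = (r.length : Int)
    · rw [if_pos hc, if_pos hc]
      cases hcB : dB.contains (r.length : Int) with
      | false =>
        have hcA : dA.contains (r.length : Int) = false := by rw [hcont]; exact hcB
        rw [PySem.Dict.getD_of_not_contains _ _ hcA, PySem.Dict.getD_of_not_contains _ _ hcB]
        simpa using pv_add_replicate r
      | true =>
        obtain ⟨v0, hv0⟩ : ∃ v0, dA.get? (r.length : Int) = some v0 := by
          have := PySem.Dict.contains_eq_isSome_get? (d := dA) (k := (r.length : Int))
          rw [hcont, hcB] at this
          exact Option.isSome_iff_exists.mp this.symm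
        rw [PySem.Dict.getD_of_get?_eq_some _ _ hv0, ← PySem.Dict.getD_of_get?_eq_some _ ([] : List (List String)) hv0, hval]
        apply pv_add_snoc
        · exact hne _ hcB
        · intro row hm
          have h2 := hlen _ row hm
          have h3 : (row.length : Int) = (r.length : Int) := h2
          exact_mod_cast h3
    · rw [if_neg hc, if_neg hc]
      exact hval c

theorem pv_fold_inv (delim : String) (hd : delim ≠ "") :
    ∀ (subs : List String) (dA dB : PySem.Dict Int (List (List String))), pvInv dA dB →
      pvInv (subs.foldl (fun d sub => pvStepA d ((PySem.Str.split? sub delim).getD [])) dA)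
            (subs.foldl (fun g sub => pvStepB g ((PySem.Str.split? sub delim).getD [])) dB) := by
  intro subs
  induction subs with
  | nil => intro dA dB h; exact h
  | cons s rest ih =>
    intro dA dB h
    simp only [List.foldl_cons]
    exact ih _ _ (pvInv_step _ _ _ (pv_split_ne_nil s delim hd) h)

theorem pvInv_empty : pvInv PySem.Dict.empty PySem.Dict.empty := by
  refine ⟨rfl, ?_, fun c => rfl, ?_, ?_, fun c => rfl⟩
  · simp [PySem.Dict.keys_empty]
  · intro c h; rw [PySem.Dict.contains_empty] at h; simp at h
  · intro c row hm; rw [PySem.Dict.getD_empty] at hm; simp at hm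

-- ===== VERDICT (by name: the statement is the Claim_ definition above) =====
theorem sublocation_to_groups_spec : Claim_equal_sublocation_to_groups := by
  intro subs delim _hdom hpre
  unfold Spec_sublocation_to_groups
  rcases hpre with hnil | hpre
  · subst hnil; rfl
  rw [pv_sublocation_to_groups_eq, pv_alt_eq]
  obtain ⟨hkeys, hnodup, _hcont, _hne, _hlen, hval⟩ := pv_fold_inv delim hpre subs PySem.Dict.empty PySem.Dict.empty pvInv_empty
  rw [PySem.Dict.items_eq_map_keys _ (hkeys ▸ hnodup) ([] : List (List String)),
      PySem.Dict.items_eq_map_keys _ hnodup ([] : List (List String)), List.map_map, hkeys]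
  apply List.map_congr_left
  intro k _
  simp only [Function.comp]
  rw [hval k]
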